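-- pv_equiv track=rewrite | github.com/pablovarch/secondary_domains_2.0 | piracy_class/sec_dom_piracy_classifier_v2.py | piracy_brand_known_for_domain
-- ===== SOURCE A (Python) =====
-- def piracy_brand_known_for_domain(domain: str, brand_keywords: list[str]) -> bool:
--     domain_lc = (domain or "").lower()
--     if not domain_lc:
--         return False
--     for kw in brand_keywords:
--         if kw and kw in domain_lc:
--             return True
--     return False
-- ===== SOURCE B (Python) =====
-- def piracy_brand_known_for_domain(domain: str, brand_keywords: list[str]) -> bool:
--     d = (domain or "").lower()
--     seen = set()
--     by_first = {}
--     for kw in brand_keywords: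
--         if kw and kw not in seen:
--             seen.add(kw)
--             by_first.setdefault(kw[0], []).append(kw)
--     return any(d.startswith(kw, i)
--                for i in range(len(d))
--                for kw in by_first.get(d[i], ()))
-- ===== Notes on version B (the rewrite author's own statement) =====
-- stated objective: alternative
-- what changed: B indexes the non-empty keywords by first character in a dict built once, then scans the lowercased domain position by position, testing only the keywords bucketed under that position's character, instead of A's per-keyword full substring ('in') scans with early return.
import Mathlib
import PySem

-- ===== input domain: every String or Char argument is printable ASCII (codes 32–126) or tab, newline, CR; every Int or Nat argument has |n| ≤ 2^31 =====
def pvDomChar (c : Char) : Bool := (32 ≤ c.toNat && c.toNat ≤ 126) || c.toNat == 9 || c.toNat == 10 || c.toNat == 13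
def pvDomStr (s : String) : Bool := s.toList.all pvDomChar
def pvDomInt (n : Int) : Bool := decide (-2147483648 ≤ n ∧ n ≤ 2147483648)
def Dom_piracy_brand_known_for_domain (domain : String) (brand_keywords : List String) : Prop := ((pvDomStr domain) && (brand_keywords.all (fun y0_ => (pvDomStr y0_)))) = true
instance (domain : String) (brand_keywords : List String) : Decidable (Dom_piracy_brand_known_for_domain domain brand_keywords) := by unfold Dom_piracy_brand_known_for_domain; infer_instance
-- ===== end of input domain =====

-- B dedups the non-empty keywords and indexes them by first character in a dict built once,
-- then scans the lowercased domain position by position, testing only the keywords bucketed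
-- under the character at that position, instead of A's per-keyword substring scans
-- (objective: alternative algorithm).

-- ===== PORT A =====
def piracy_brand_known_for_domain (domain : String) (brand_keywords : List String) : Bool :=
  -- domain_lc = (domain or "").lower(); for a str argument, (domain or "") = domain
  let domain_lc := PySem.Str.lower domain
  if domain_lc == "" then false
  else
    -- for kw in brand_keywords: if kw and kw in domain_lc: return True / return False
    brand_keywords.any (fun kw => kw != "" && PySem.Str.isIn kw domain_lc)

-- ===== PORT B =====
-- loop body of B's index-building pass:
-- if kw and kw not in seen: seen.add(kw); by_first.setdefault(kw[0], []).append(kw)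
def pvStepB (st : PySem.Set String × PySem.Dict Char (List String)) (kw : String) :
    PySem.Set String × PySem.Dict Char (List String) :=
  match kw.toList with
  | [] => st
  | c :: _ =>
    if st.1.contains kw then st
    else (st.1.add kw, st.2.insert c (st.2.getD c [] ++ [kw]))

def piracy_brand_known_for_domain_alt (domain : String) (brand_keywords : List String) : Bool :=
  let d := (PySem.Str.lower domain).toList
  -- seen = set(); by_first = {}; for kw in brand_keywords: pvStepB
  let st := brand_keywords.foldl pvStepB (PySem.Set.empty, PySem.Dict.empty)
  -- any(d.startswith(kw, i) for i in range(len(d)) for kw in by_first.get(d[i], ()));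
  -- d.startswith(kw, i) with 0 ≤ i ≤ len(d) is: kw is a prefix of d[i:]
  (List.range d.length).any (fun i =>
    (st.2.getD d[i]! []).any (fun kw => PySem.Chars.startswith (d.drop i) kw.toList))

-- ===== PRECONDITION & SPEC =====
def Spec_piracy_brand_known_for_domain (domain : String) (brand_keywords : List String) (out : Bool) : Prop := out = piracy_brand_known_for_domain_alt domain brand_keywords
instance (domain : String) (brand_keywords : List String) (out : Bool) : Decidable (Spec_piracy_brand_known_for_domain domain brand_keywords out) := by unfold Spec_piracy_brand_known_for_domain; infer_instance

-- ===== CLAIM (what is proved, stated in full; the proofs are below) =====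
def Claim_equal_piracy_brand_known_for_domain : Prop := ∀ (domain : String) (brand_keywords : List String), Dom_piracy_brand_known_for_domain domain brand_keywords → Spec_piracy_brand_known_for_domain domain brand_keywords (piracy_brand_known_for_domain domain brand_keywords)

-- ===== LEMMAS AND PROOFS =====

-- the invariant of B's index: a keyword sits in bucket c iff it was seen and starts with c
def pvInvB (st : PySem.Set String × PySem.Dict Char (List String)) : Prop :=
  ∀ kw c, kw ∈ st.2.getD c [] ↔ (st.1.contains kw = true ∧ kw.toList.head? = some c)

theorem pv_stepB_contains (st : PySem.Set String × PySem.Dict Char (List String))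
    (kw kw' : String) :
    (pvStepB st kw).1.contains kw' = true ↔
      (st.1.contains kw' = true ∨ (kw' = kw ∧ kw ≠ "")) := by
  unfold pvStepB
  cases hkw : kw.toList with
  | nil =>
    have : kw = "" := String.toList_eq_nil_iff.mp hkw
    simp [this]
  | cons c rest =>
    have hne : kw ≠ "" := by
      intro h; rw [h] at hkw; simp at hkw
    by_cases hc : st.1.contains kw
    · simp only [hc, if_true]
      constructor
      · exact Or.inl
      · rintro (h | ⟨rfl, -⟩) <;> [exact h; exact hc]
    · simp only [hc, if_false, Bool.false_eq_true]
      rw [PySem.Set.contains_iff, PySem.Set.mem_add, ← PySem.Set.contains_iff]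
      tauto

theorem pv_stepB_inv (st : PySem.Set String × PySem.Dict Char (List String))
    (kw : String) (h : pvInvB st) : pvInvB (pvStepB st kw) := by
  intro kw' c
  rw [pv_stepB_contains]
  show kw' ∈ (pvStepB st kw).2.getD c [] ↔ _
  unfold pvStepB
  cases hkw : kw.toList with
  | nil =>
    have : kw = "" := String.toList_eq_nil_iff.mp hkw
    simp only [this]
    rw [h kw' c]
    tauto
  | cons c' rest =>
    have hne : kw ≠ "" := by
      intro hh; rw [hh] at hkw; simp at hkw
    by_cases hc : st.1.contains kw
    · simp only [hc, if_true]
      rw [h kw' c]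
      constructor
      · rintro ⟨hk, hh⟩; exact ⟨Or.inl hk, hh⟩
      · rintro ⟨hk | ⟨rfl, -⟩, hh⟩ <;> exact ⟨by simp_all, hh⟩
    · simp only [hc, if_false, Bool.false_eq_true]
      rw [PySem.Dict.getD_insert]
      by_cases hcc : c = c'
      · subst hcc
        rw [if_pos rfl, List.mem_append, List.mem_singleton, h kw' c]
        constructor
        · rintro (⟨hk, hh⟩ | rfl)
          · exact ⟨Or.inl hk, hh⟩
          · exact ⟨Or.inr ⟨rfl, hne⟩, by simp [hkw]⟩
        · rintro ⟨hk | ⟨rfl, -⟩, hh⟩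
          · exact Or.inl ⟨hk, hh⟩
          · exact Or.inr rfl
      · rw [if_neg hcc, h kw' c]
        constructor
        · rintro ⟨hk, hh⟩; exact ⟨Or.inl hk, hh⟩
        · rintro ⟨hk | ⟨rfl, -⟩, hh⟩
          · exact ⟨hk, hh⟩
          · rw [hkw] at hh; simp at hh; exact absurd hh.symm hcc

theorem pv_foldB_mem (bks : List String) (st : PySem.Set String × PySem.Dict Char (List String))
    (h : pvInvB st) (kw : String) (c : Char) :
    kw ∈ (bks.foldl pvStepB st).2.getD c [] ↔
      ((st.1.contains kw = true ∨ (kw ∈ bks ∧ kw ≠ "")) ∧ kw.toList.head? = some c) := by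
  induction bks generalizing st with
  | nil => simpa using h kw c
  | cons kw0 rest ih =>
    rw [List.foldl_cons, ih _ (pv_stepB_inv st kw0 h), pv_stepB_contains]
    simp only [List.mem_cons]
    constructor
    · rintro ⟨(hk | ⟨rfl, hn⟩) | ⟨hm, hn⟩, h2⟩
      · exact ⟨Or.inl hk, h2⟩
      · exact ⟨Or.inr ⟨Or.inl rfl, hn⟩, h2⟩
      · exact ⟨Or.inr ⟨Or.inr hm, hn⟩, h2⟩
    · rintro ⟨hk | ⟨rfl | hm, hn⟩, h2⟩
      · exact ⟨Or.inl (Or.inl hk), h2⟩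
      · exact ⟨Or.inl (Or.inr ⟨rfl, hn⟩), h2⟩
      · exact ⟨Or.inr ⟨hm, hn⟩, h2⟩

-- buckets of the dict built from the empty state
theorem pv_byFirst_mem (bks : List String) (kw : String) (c : Char) :
    kw ∈ (bks.foldl pvStepB (PySem.Set.empty, PySem.Dict.empty)).2.getD c [] ↔
      ((kw ∈ bks ∧ kw ≠ "") ∧ kw.toList.head? = some c) := by
  rw [pv_foldB_mem]
  · simp [PySem.Set.empty]
  · intro kw' c'
    simp [PySem.Set.empty]

-- a non-empty list is an infix iff it is a prefix at some position strictly inside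
theorem pv_infix_iff_prefix_at (k l : List Char) (hk : k ≠ []) :
    k <:+: l ↔ ∃ i, i < l.length ∧ k <+: l.drop i := by
  constructor
  · rintro ⟨s, t, rfl⟩
    refine ⟨s.length, ?_, ?_⟩
    · have : 0 < k.length := List.length_pos_iff.mpr hk
      simp [List.length_append]; omega
    · rw [List.append_assoc, List.drop_left]
      exact ⟨t, rfl⟩
  · rintro ⟨i, _, hp⟩
    exact hp.isInfix.trans (List.drop_suffix i l).isInfix

-- a non-empty prefix of l.drop i starts with l[i]
theorem pv_head?_of_prefix_drop (k l : List Char) (i : Nat) (hi : i < l.length)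
    (hk : k ≠ []) (hp : k <+: l.drop i) : k.head? = some l[i]! := by
  obtain ⟨t, ht⟩ := hp
  have h1 : k.head? = (l.drop i).head? := by
    rw [← ht, List.head?_append_of_ne_nil _ hk]
  rw [h1, List.head?_drop, List.getElem?_eq_getElem hi, List.getElem!_eq_getElem?_getD,
    List.getElem?_eq_getElem hi, Option.getD_some]

-- ===== VERDICT (by name: the statement is the Claim_ definition above) =====
theorem piracy_brand_known_for_domain_spec : Claim_equal_piracy_brand_known_for_domain := by
  intro domain brand_keywords _
  unfold Spec_piracy_brand_known_for_domain
  unfold piracy_brand_known_for_domain piracy_brand_known_for_domain_alt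
  simp only []
  set d := PySem.Str.lower domain with hd
  by_cases hE : d == ""
  · have he : d = "" := beq_iff_eq.mp hE
    simp [he]
  · simp only [hE]
    rw [Bool.eq_iff_iff, if_neg Bool.false_ne_true]
    simp only [List.any_eq_true, List.mem_range, PySem.Str.isIn_iff_infix,
      PySem.Chars.startswith_iff, Bool.and_eq_true, bne_iff_ne, ne_eq,
      pv_byFirst_mem]
    constructor
    · rintro ⟨kw, hmem, hne, hinf⟩
      have hkl : kw.toList ≠ [] := by
        intro h; exact hne (String.toList_eq_nil_iff.mp h)
      obtain ⟨i, hi, hp⟩ := (pv_infix_iff_prefix_at _ _ hkl).mp hinf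
      exact ⟨i, hi, kw, ⟨⟨hmem, hne⟩, pv_head?_of_prefix_drop _ _ _ hi hkl hp⟩, hp⟩
    · rintro ⟨i, hi, kw, ⟨⟨hmem, hne⟩, -⟩, hp⟩
      have hkl : kw.toList ≠ [] := by
        intro h; exact hne (String.toList_eq_nil_iff.mp h)
      exact ⟨kw, hmem, hne, (pv_infix_iff_prefix_at _ _ hkl).mpr ⟨i, hi, hp⟩⟩
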